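-- pv_equiv track=rewrite | github.com/jbolognini/pythonista_chess | game_view.py | _strip_move_prefix
-- ===== SOURCE A (Python) =====
-- def _strip_move_prefix(san: str) -> str:
--     s = (san or "").strip()
--     if not s:
--         return s
--
--     # Remove leading "12." or "12..." if present
--     i = 0
--     n = len(s)
--
--     # digits
--     while i < n and s[i].isdigit():
--         i += 1
--     if i == 0:
--         return s  # no leading digits
--
--     # dot(s)
--     if i < n and s[i] == ".":
--         i += 1
--         if i < n and s[i] == ".":
--             i += 1
--             if i < n and s[i] == ".":
--                 i += 1
--
--         # optional space after the prefix
--         while i < n and s[i] == " ":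
--             i += 1
--
--         return s[i:].strip()
--
--     return s
-- ===== SOURCE B (Python) =====
-- def _strip_move_prefix(san: str) -> str:
--     s = (san or "").strip()
--     if not s:
--         return s
--     # split once at the first dot; the move number is exactly the part before it
--     head, dot, rest = s.partition(".")
--     if not dot or not head.isdigit():
--         return s
--     # up to two further dots belong to the prefix ("12..." for a black move)
--     extra = 2 if rest.startswith("..") else 1 if rest.startswith(".") else 0
--     return rest[extra:].strip()
-- ===== Notes on version B (the rewrite author's own statement) =====
-- stated objective: simpler
-- what changed: Replaced A's positional index-walking scan (digit loop, nested dot ifs, space loop) by a single str.partition at the first dot plus a whole-string isdigit test on the part before it; a branch chain on the two leading characters of the remainder replaces the nested dot ifs, and one final strip() subsumes the space loop.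
import Mathlib
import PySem

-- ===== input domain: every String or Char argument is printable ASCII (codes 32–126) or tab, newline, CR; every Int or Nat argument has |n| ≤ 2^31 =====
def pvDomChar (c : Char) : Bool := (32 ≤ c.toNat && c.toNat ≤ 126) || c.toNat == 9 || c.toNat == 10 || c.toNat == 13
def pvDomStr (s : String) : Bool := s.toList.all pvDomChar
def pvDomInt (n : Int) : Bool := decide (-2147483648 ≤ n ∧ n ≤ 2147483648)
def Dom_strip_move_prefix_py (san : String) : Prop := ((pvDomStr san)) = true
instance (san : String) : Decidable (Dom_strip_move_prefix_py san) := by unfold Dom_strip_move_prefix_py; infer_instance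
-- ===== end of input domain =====

-- B replaces A's positional digit/dot/space scan by a single partition at the first dot plus a
-- whole-string isdigit test on the part before it (simpler decomposition; same cost).

-- ===== PORT A =====
def aScanDigits (cs : List Char) (i : Nat) : Nat :=
  if h : i < cs.length then
    if PySem.Chars.isdigit cs[i] then aScanDigits cs (i + 1) else i
  else i
termination_by cs.length - i

def aScanSpaces (cs : List Char) (i : Nat) : Nat :=
  if h : i < cs.length then
    if cs[i] = ' ' then aScanSpaces cs (i + 1) else i
  else i
termination_by cs.length - i

def strip_move_prefix_py (san : String) : String :=
  let s := PySem.Str.strip san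
  if s = "" then s
  else
    let cs := s.toList
    let i := aScanDigits cs 0
    if i = 0 then s
    else if cs[i]? = some '.' then
      let i := i + 1
      let i := if cs[i]? = some '.' then
                 (if cs[i + 1]? = some '.' then i + 2 else i + 1)
               else i
      let i := aScanSpaces cs i
      String.ofList (PySem.Chars.strip (cs.drop i))
    else s

-- ===== PORT B =====
def strip_move_prefix_py_alt (san : String) : String :=
  let s := PySem.Str.strip san
  if s = "" then s
  else
    let cs := s.toList
    -- s.partition("."): head = text before the first '.', rest = text after it;
    -- 'not dot' (no '.' found) ⟺ head is all of s
    let head := cs.takeWhile (fun c => !(c == '.'))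
    if head.length = cs.length ∨ PySem.Chars.strIsdigit head = false then s
    else
      let rest := cs.drop (head.length + 1)
      let extra := if PySem.Chars.startswith rest ['.', '.'] then 2
                   else if PySem.Chars.startswith rest ['.'] then 1 else 0
      String.ofList (PySem.Chars.strip (rest.drop extra))

-- ===== PRECONDITION & SPEC =====
def Spec_strip_move_prefix_py (san : String) (out : String) : Prop := out = strip_move_prefix_py_alt san
instance (san : String) (out : String) : Decidable (Spec_strip_move_prefix_py san out) := by unfold Spec_strip_move_prefix_py; infer_instance

-- ===== CLAIM (what is proved, stated in full; the proofs are below) =====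
def Claim_equal_strip_move_prefix_py : Prop := ∀ (san : String), Dom_strip_move_prefix_py san → Spec_strip_move_prefix_py san (strip_move_prefix_py san)

-- ===== LEMMAS AND PROOFS =====

theorem aScanDigits_eq (cs : List Char) (j : Nat) :
    aScanDigits cs j = j + ((cs.drop j).takeWhile PySem.Chars.isdigit).length := by
  induction' h : cs.length - j using Nat.strong_induction_on with n ih generalizing j
  rw [aScanDigits]
  split_ifs with hj hd
  · have hdrop : cs.drop j = cs[j] :: cs.drop (j + 1) :=
      (List.drop_eq_getElem_cons hj)
    rw [ih (cs.length - (j+1)) (by omega) (j+1) rfl, hdrop, List.takeWhile_cons_of_pos hd]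
    simp; omega
  · have hdrop : cs.drop j = cs[j] :: cs.drop (j + 1) :=
      (List.drop_eq_getElem_cons hj)
    rw [hdrop, List.takeWhile_cons_of_neg (by simpa using hd)]
    simp
  · rw [List.drop_eq_nil_of_le (by omega)]
    simp

theorem strip_drop_scanSpaces (cs : List Char) (j : Nat) :
    PySem.Chars.strip (cs.drop (aScanSpaces cs j)) = PySem.Chars.strip (cs.drop j) := by
  induction' h : cs.length - j using Nat.strong_induction_on with n ih generalizing j
  rw [aScanSpaces]
  split_ifs with hj hs
  · rw [ih (cs.length - (j+1)) (by omega) (j+1) rfl]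
    have hdrop : cs.drop j = cs[j] :: cs.drop (j + 1) :=
      (List.drop_eq_getElem_cons hj)
    rw [hdrop, PySem.Chars.strip, PySem.Chars.strip, PySem.Chars.lstrip, PySem.Chars.lstrip,
      List.dropWhile_cons_of_pos (by rw [hs]; decide)]
  · rfl
  · rfl

-- takeWhile is determined by "all of take j holds, j is length or fails at j"
theorem takeWhile_eq_take_of (p : Char → Bool) (cs : List Char) (j : Nat) (hj : j ≤ cs.length)
    (hall : ∀ i (h : i < j), p (cs[i]'(lt_of_lt_of_le h hj)) = true)
    (hstop : ∀ h : j < cs.length, p (cs[j]'h) = false) :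
    cs.takeWhile p = cs.take j := by
  induction cs generalizing j with
  | nil => simp
  | cons a t ih =>
    cases j with
    | zero =>
      have h0 : p a = false := by simpa using hstop (by simp)
      rw [List.takeWhile_cons_of_neg (by simp [h0]), List.take_zero]
    | succ j =>
      have ha : p a = true := by simpa using hall 0 (by omega)
      rw [List.takeWhile_cons_of_pos ha, List.take_succ_cons,
        ih j (by simpa using hj)
          (fun i h => by simpa using hall (i+1) (by omega))
          (fun h => by simpa using hstop (by simpa using h))]

theorem takeWhile_stop (p : Char → Bool) (cs : List Char) (c : Char)
    (h : cs[(cs.takeWhile p).length]? = some c) : p c = false := by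
  induction cs with
  | nil => simp at h
  | cons a t ih =>
    by_cases hp : p a = true
    · rw [List.takeWhile_cons_of_pos hp] at h
      exact ih (by simpa using h)
    · have hp' : p a = false := by cases hb : p a with
        | false => rfl
        | true => exact absurd hb hp
      rw [List.takeWhile_cons_of_neg (by simp [hp'])] at h
      simp at h
      rw [← h]
      exact hp'

theorem startswith_one (xs : List Char) (c : Char) :
    PySem.Chars.startswith xs [c] = true ↔ xs[0]? = some c := by
  rw [PySem.Chars.startswith_iff]
  cases xs with
  | nil => simp
  | cons a t => simp [List.cons_prefix_cons, eq_comm]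

theorem startswith_two (xs : List Char) (c c' : Char) :
    PySem.Chars.startswith xs [c, c'] = true ↔ (xs[0]? = some c ∧ xs[1]? = some c') := by
  rw [PySem.Chars.startswith_iff]
  cases xs with
  | nil => simp
  | cons a t =>
    cases t with
    | nil => simp [List.cons_prefix_cons, eq_comm]
    | cons b u => simp [List.cons_prefix_cons, eq_comm]

theorem isdigit_ne_dot (c : Char) (h : PySem.Chars.isdigit c = true) : c ≠ '.' := by
  intro hc; rw [hc] at h; exact absurd h (by decide)

set_option maxHeartbeats 1600000 in
theorem main (san : String) : strip_move_prefix_py san = strip_move_prefix_py_alt san := by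
  unfold strip_move_prefix_py strip_move_prefix_py_alt
  by_cases hse : PySem.Str.strip san = ""
  · simp [hse]
  · simp only [if_neg hse]
    obtain ⟨cs, hcs⟩ : ∃ l, (PySem.Str.strip san).toList = l := ⟨_, rfl⟩
    rw [hcs]
    have hcsne : cs ≠ [] := by
      rw [← hcs]; intro h
      exact hse (String.toList_eq_nil_iff.mp h)
    have hcspos : 0 < cs.length := List.length_pos_of_ne_nil hcsne
    set k := (cs.takeWhile PySem.Chars.isdigit).length with hk
    have hscan : aScanDigits cs 0 = k := by rw [aScanDigits_eq]; simpa using hk.symm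
    have htakek : cs.takeWhile PySem.Chars.isdigit = cs.take k := by
      rw [hk]; exact List.prefix_iff_eq_take.mp (List.takeWhile_prefix _)
    have hklen : k ≤ cs.length := by
      rw [hk]; exact (List.takeWhile_prefix _).length_le
    have hdig : ∀ i (h : i < k), PySem.Chars.isdigit (cs[i]'(lt_of_lt_of_le h hklen)) = true := by
      intro i h
      have hi : i < (cs.take k).length := by
        rw [List.length_take]; omega
      have hmem : cs[i]'(lt_of_lt_of_le h hklen) ∈ cs.takeWhile PySem.Chars.isdigit := by
        rw [htakek]
        exact List.mem_of_getElem (h := hi) (List.getElem_take)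
      exact List.mem_takeWhile_imp hmem
    have hstopk? : ∀ c, cs[k]? = some c → PySem.Chars.isdigit c = false := by
      intro c h
      rw [hk] at h
      exact takeWhile_stop PySem.Chars.isdigit cs c h
    have hstopk : ∀ h : k < cs.length, PySem.Chars.isdigit (cs[k]'h) = false := by
      intro h
      exact takeWhile_stop PySem.Chars.isdigit cs _
        (by rw [← hk, List.getElem?_eq_getElem h])
    set head := cs.takeWhile (fun c => !(c == '.')) with hhead
    have hheadpre : head = cs.take head.length := by
      rw [hhead]; exact List.prefix_iff_eq_take.mp (List.takeWhile_prefix _)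
    have hheadlen : head.length ≤ cs.length := by
      rw [hhead]; exact (List.takeWhile_prefix _).length_le
    have hheadstop : ∀ h : head.length < cs.length, cs[head.length]'h = '.' := by
      intro h
      have h2 := takeWhile_stop (fun c => !(c == '.')) cs _
        (by rw [← hhead, List.getElem?_eq_getElem h])
      simpa using h2
    have hheadstop? : head.length < cs.length → cs[head.length]? = some '.' := by
      intro h
      rw [List.getElem?_eq_getElem h, hheadstop h]
    rw [hscan]
    by_cases hg : k ≠ 0 ∧ cs[k]? = some '.'
    · -- prefix found by both
      obtain ⟨hk0, hkdot⟩ := hg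
      obtain ⟨hklt, hgetk⟩ := List.getElem?_eq_some_iff.mp hkdot
      have hheq : head = cs.take k := by
        rw [hhead]
        refine takeWhile_eq_take_of _ cs k hklen (fun i h => ?_) (fun h => ?_)
        · simpa using isdigit_ne_dot _ (hdig i h)
        · simp [hgetk]
      have hhl : head.length = k := by rw [hheq, List.length_take]; omega
      have hguardB : ¬ (head.length = cs.length ∨ PySem.Chars.strIsdigit head = false) := by
        push_neg
        constructor
        · rw [hhl]
          exact Nat.ne_of_lt hklt
        · have hner : head ≠ [] := by
            intro h
            have h0 := hhl
            rw [h] at h0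
            simp at h0
            exact hk0 h0.symm
          have hallr : head.all PySem.Chars.isdigit = true := by
            rw [hheq, List.all_eq_true]
            intro c hc
            obtain ⟨i, hi, rfl⟩ := List.mem_iff_getElem.mp hc
            have hik : i < k := by
              rw [List.length_take] at hi
              omega
            rw [List.getElem_take]
            exact hdig i hik
          have : PySem.Chars.strIsdigit head = true := by
            simp only [PySem.Chars.strIsdigit, hallr, Bool.and_true, Bool.not_eq_eq_eq_not,
              Bool.not_false]
            simp [List.isEmpty_iff, hner]
          simp [this]
      rw [if_neg (by simpa using hk0), if_pos hkdot, if_neg hguardB,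
        strip_drop_scanSpaces, hhl]
      have hr0 : (cs.drop (k + 1))[0]? = cs[k + 1]? := by
        rw [List.getElem?_drop]
      have hr1 : (cs.drop (k + 1))[1]? = cs[k + 2]? := by
        rw [List.getElem?_drop]
      have hdd : ∀ m : Nat, (cs.drop (k + 1)).drop m = cs.drop (k + 1 + m) := by
        intro m
        rw [List.drop_drop]
      by_cases h1 : cs[k + 1]? = some '.'
      · by_cases h2 : cs[k + 1 + 1]? = some '.'
        · rw [if_pos h1, if_pos h2,
            if_pos ((startswith_two _ '.' '.').mpr ⟨by rw [hr0]; exact h1,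
              by rw [hr1]; exact (by simpa using h2)⟩),
            hdd 2]
        · have hs2 : ¬ PySem.Chars.startswith (cs.drop (k + 1)) ['.', '.'] = true := by
            intro hsw
            exact h2 (by simpa using (hr1 ▸ ((startswith_two _ '.' '.').mp hsw).2))
          rw [if_pos h1, if_neg h2, if_neg hs2,
            if_pos ((startswith_one _ '.').mpr (hr0 ▸ h1)),
            hdd 1]
      · have hs2 : ¬ PySem.Chars.startswith (cs.drop (k + 1)) ['.', '.'] = true := by
          intro hsw
          exact h1 (hr0 ▸ ((startswith_two _ '.' '.').mp hsw).1)
        have hs1 : ¬ PySem.Chars.startswith (cs.drop (k + 1)) ['.'] = true := by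
          intro hsw
          exact h1 (hr0 ▸ (startswith_one _ '.').mp hsw)
        rw [if_neg h1, if_neg hs2, if_neg hs1, hdd 0]
    · -- no prefix: both return s
      have hguardB : head.length = cs.length ∨ PySem.Chars.strIsdigit head = false := by
        by_cases hk0 : k = 0
        · -- no leading digits
          right
          cases hhe : head with
          | nil => simp [PySem.Chars.strIsdigit, hhe]
          | cons a t =>
            have hhlpos : 0 < head.length := by rw [hhe]; simp
            have ha : a = cs[0]'hcspos := by
              have := hheadpre
              rw [hhe] at this
              have := congrArg (fun l => l[0]?) this
              simpa [List.getElem?_take, hhlpos, List.getElem?_eq_getElem hcspos] using this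
            have hnd : PySem.Chars.isdigit (cs[0]'hcspos) = false := by
              refine hstopk? _ ?_
              rw [hk0]
              exact List.getElem?_eq_getElem hcspos
            simp only [PySem.Chars.strIsdigit, hhe]
            simp [ha, hnd]
        · -- digits not followed by a dot
          have hkdotne : cs[k]? ≠ some '.' := fun h => hg ⟨hk0, h⟩
          by_cases hkl : k = cs.length
          · left
            have : head = cs.take cs.length := by
              rw [hhead]
              refine takeWhile_eq_take_of _ cs cs.length le_rfl (fun i h => ?_) (fun h => by omega)
              simpa using isdigit_ne_dot _ (hdig i (by omega))
            rw [this, List.take_length]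
          · right
            have hklt : k < cs.length := by omega
            have hkne : cs[k]'hklt ≠ '.' := by
              intro h
              exact hkdotne (by rw [List.getElem?_eq_getElem hklt, h])
            have hkhl : k < head.length := by
              by_contra hle
              push_neg at hle
              rcases lt_or_eq_of_le hle with hlt | heq
              · -- head stops inside the digit run: a digit would be '.'
                have hd : cs[head.length]'(by omega) = '.' := hheadstop (by omega)
                exact isdigit_ne_dot _ (hdig head.length hlt) hd
              · exact hkdotne (by rw [← heq]; exact hheadstop? (by omega))
            have hmem : cs[k]'hklt ∈ head := by
              rw [hheadpre]
              have hk2 : k < (cs.take head.length).length := by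
                rw [List.length_take]; omega
              exact List.mem_of_getElem (h := hk2) (List.getElem_take)
            simp only [PySem.Chars.strIsdigit]
            have : ¬ head.all PySem.Chars.isdigit = true := by
              intro hall
              have := List.all_eq_true.mp hall _ hmem
              rw [hstopk hklt] at this
              exact absurd this (by decide)
            simp only [Bool.and_eq_false_iff]
            right
            cases hb : head.all PySem.Chars.isdigit with
            | false => rfl
            | true => exact absurd hb this
      rw [if_pos hguardB]
      by_cases hk0 : k = 0
      · rw [if_pos hk0]
      · rw [if_neg hk0, if_neg (fun h => hg ⟨hk0, h⟩)]

-- ===== VERDICT (by name: the statement is the Claim_ definition above) =====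
theorem strip_move_prefix_py_spec : Claim_equal_strip_move_prefix_py := by
  intro san _
  unfold Spec_strip_move_prefix_py
  exact main san
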